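-- pv_equiv track=rewrite | github.com/Laura-Tovo/EP-2--Luli-e-Laura | funcoes.py | esta_na_lista
-- ===== SOURCE A (Python) =====
-- def esta_na_lista(pais,lista):
--     cond=True
--     lista_limpa=[]
--     for item in lista:
--         lista_limpa.extend(item)
--
--     if pais not in lista_limpa:
--         cond=False
--     if pais in lista_limpa:
--         cond=True
--     return cond
-- ===== SOURCE B (Python) =====
-- def esta_na_lista(pais, lista):
--     achou = False
--     for item in lista:
--         for el in item:
--             if el == pais:
--                 achou = True
--     return achou
-- ===== Notes on version B (the rewrite author's own statement) =====
-- stated objective: simpler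
-- what changed: B drops the flatten-into-a-new-list-then-two-membership-tests design and instead accumulates a boolean in a single nested element-wise pass, building no intermediate list.
import Mathlib
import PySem

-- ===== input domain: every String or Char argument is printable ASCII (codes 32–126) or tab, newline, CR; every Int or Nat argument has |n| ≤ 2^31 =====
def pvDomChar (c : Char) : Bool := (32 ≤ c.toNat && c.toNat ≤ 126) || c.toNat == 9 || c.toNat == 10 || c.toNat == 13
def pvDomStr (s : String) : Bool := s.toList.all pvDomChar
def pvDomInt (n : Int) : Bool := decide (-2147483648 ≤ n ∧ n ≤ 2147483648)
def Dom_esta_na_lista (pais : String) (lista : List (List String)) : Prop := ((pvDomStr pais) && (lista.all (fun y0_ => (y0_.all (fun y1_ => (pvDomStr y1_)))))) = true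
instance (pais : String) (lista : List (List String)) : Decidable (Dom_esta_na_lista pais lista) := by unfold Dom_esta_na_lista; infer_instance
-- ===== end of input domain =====

-- B replaces A's flatten-then-two-membership-tests with a single nested boolean-accumulating pass (objective: simpler; no intermediate list).

-- ===== PORT A =====
-- cond = True; lista_limpa built by extend; then the two membership ifs.
def esta_na_lista (pais : String) (lista : List (List String)) : Bool :=
  let cond := true
  let lista_limpa := lista.foldl (fun acc item => acc ++ item) []
  let cond := if ¬ (lista_limpa.contains pais) then false else cond
  let cond := if lista_limpa.contains pais then true else cond
  cond

-- ===== PORT B =====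
def esta_na_lista_alt (pais : String) (lista : List (List String)) : Bool :=
  lista.foldl (fun achou item =>
    item.foldl (fun a el => if el == pais then true else a) achou) false

-- ===== PRECONDITION & SPEC =====
def Spec_esta_na_lista (pais : String) (lista : List (List String)) (out : Bool) : Prop := out = esta_na_lista_alt pais lista
instance (pais : String) (lista : List (List String)) (out : Bool) : Decidable (Spec_esta_na_lista pais lista out) := by unfold Spec_esta_na_lista; infer_instance

-- ===== CLAIM (what is proved, stated in full; the proofs are below) =====
def Claim_equal_esta_na_lista : Prop := ∀ (pais : String) (lista : List (List String)), Dom_esta_na_lista pais lista → Spec_esta_na_lista pais lista (esta_na_lista pais lista)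

-- ===== LEMMAS AND PROOFS =====
theorem foldl_append_flatten (lista : List (List String)) :
    ∀ acc : List String, lista.foldl (fun acc item => acc ++ item) acc = acc ++ lista.flatten := by
  induction lista with
  | nil => simp
  | cons x xs ih => intro acc; simp [ih]

theorem a_eq (pais : String) (lista : List (List String)) :
    esta_na_lista pais lista = lista.flatten.contains pais := by
  unfold esta_na_lista
  simp only [foldl_append_flatten, List.nil_append]
  by_cases hc : lista.flatten.contains pais = true
  · simp [hc]
  · simp [hc]

theorem inner_foldl (pais : String) (item : List String) (a : Bool) :
    item.foldl (fun a el => if el == pais then true else a) a = (a || item.contains pais) := by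
  induction item generalizing a with
  | nil => simp
  | cons x xs ih =>
    simp only [List.foldl_cons, ih]
    by_cases hx : x = pais
    · simp [hx]
    · simp [hx, Ne.symm hx]

theorem alt_eq (pais : String) (lista : List (List String)) :
    esta_na_lista_alt pais lista = lista.flatten.contains pais := by
  unfold esta_na_lista_alt
  suffices h : ∀ a : Bool, lista.foldl (fun achou item =>
      item.foldl (fun a el => if el == pais then true else a) achou) a
      = (a || lista.flatten.contains pais) by simpa using h false
  induction lista with
  | nil => simp
  | cons x xs ih =>
    intro a
    rw [List.foldl_cons, ih, inner_foldl]
    simp [Bool.or_assoc]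

-- ===== VERDICT (by name: the statement is the Claim_ definition above) =====
theorem esta_na_lista_spec : Claim_equal_esta_na_lista := by
  intro pais lista _
  unfold Spec_esta_na_lista
  rw [a_eq, alt_eq]
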